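-- pv_equiv track=rewrite | github.com/ericvives227-maker/homework-analyzer | src/detailed_solver.py | extract_mistakes
-- ===== SOURCE A (Python) =====
-- def extract_mistakes(solutions):
--     """Extract common mistakes from all solutions"""
--     all_mistakes = []
--
--     for solution in solutions:
--         mistakes_text = solution.get('common_mistakes', '')
--         if mistakes_text:
--             # Split by numbered items if numbered
--             mistake_items = [m.strip() for m in mistakes_text.split('\n') if m.strip()]
--             all_mistakes.extend(mistake_items)
--
--     # Remove duplicates and return top mistakes
--     unique_mistakes = list(dict.fromkeys(all_mistakes))
--     return unique_mistakes[:15]  # Top 15 mistakes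
-- ===== SOURCE B (Python) =====
-- def extract_mistakes(solutions):
--     """Extract common mistakes from all solutions"""
--     seen = set()
--     result = []
--     for solution in solutions:
--         mistakes_text = solution.get('common_mistakes', '')
--         if mistakes_text:
--             for raw in mistakes_text.split('\n'):
--                 line = raw.strip()
--                 if line and line not in seen:
--                     seen.add(line)
--                     result.append(line)
--                     if len(result) == 15:
--                         return result
--     return result
-- ===== Notes on version B (the rewrite author's own statement) =====
-- stated objective: alternative
-- what changed: Fuses A's separate collect / dedup / slice phases into one early-terminating pass that maintains a seen-set and a result list and returns as soon as 15 distinct mistakes are found, never building the full intermediate list.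
import Mathlib
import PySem

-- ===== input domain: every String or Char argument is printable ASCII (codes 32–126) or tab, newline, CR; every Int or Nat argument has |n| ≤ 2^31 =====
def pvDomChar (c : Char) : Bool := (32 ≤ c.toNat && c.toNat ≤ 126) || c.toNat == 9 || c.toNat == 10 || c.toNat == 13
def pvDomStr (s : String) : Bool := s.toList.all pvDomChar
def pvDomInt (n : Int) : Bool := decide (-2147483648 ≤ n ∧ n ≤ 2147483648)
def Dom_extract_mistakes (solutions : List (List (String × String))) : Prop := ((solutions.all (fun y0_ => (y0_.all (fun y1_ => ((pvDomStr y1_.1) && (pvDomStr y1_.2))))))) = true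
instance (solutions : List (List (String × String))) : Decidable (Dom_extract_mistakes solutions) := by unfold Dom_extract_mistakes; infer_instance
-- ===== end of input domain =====

-- B fuses A's collect-all / dedup / slice phases into one early-terminating pass with a seen-set
-- and a result list that stops as soon as 15 distinct mistakes have been found (objective: alternative).

-- ===== PORT A =====
def extract_mistakes (solutions : List (List (String × String))) : List String :=
  let all_mistakes := solutions.foldl (fun all_mistakes solution =>
    let mistakes_text := (PySem.Dict.mk solution).getD "common_mistakes" ""
    if mistakes_text ≠ "" then
      -- [m.strip() for m in mistakes_text.split('\n') if m.strip()]
      -- split? is `some` here since the separator "\n" is non-empty; getD is exact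
      all_mistakes ++ (((PySem.Str.split? mistakes_text "\n").getD []).map PySem.Str.strip).filter (fun m => m ≠ "")
    else all_mistakes) []
  -- list(dict.fromkeys(all_mistakes)) is PySem.List.dedup (first occurrences, in order)
  let unique_mistakes := PySem.List.dedup all_mistakes
  PySem.List.slice unique_mistakes none (some 15)

-- ===== PORT B =====
-- inner loop of Source B: returns (seen, result, done); done = true means `return result` fired
def pvAltInner : PySem.Set String → List String → List String → PySem.Set String × List String × Bool
  | seen, result, [] => (seen, result, false)
  | seen, result, raw :: rest =>
    let line := PySem.Str.strip raw
    if line ≠ "" ∧ line ∉ seen then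
      let result' := result ++ [line]
      if result'.length = 15 then (seen.add line, result', true)
      else pvAltInner (seen.add line) result' rest
    else pvAltInner seen result rest

def pvAltOuter : PySem.Set String → List String → List (List (String × String)) → List String
  | _, result, [] => result
  | seen, result, solution :: rest =>
    let mistakes_text := (PySem.Dict.mk solution).getD "common_mistakes" ""
    if mistakes_text ≠ "" then
      -- split? is `some` here since the separator "\n" is non-empty; getD is exact
      match pvAltInner seen result ((PySem.Str.split? mistakes_text "\n").getD []) with
      | (seen', result', done) => if done then result' else pvAltOuter seen' result' rest
    else pvAltOuter seen result rest

def extract_mistakes_alt (solutions : List (List (String × String))) : List String :=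
  pvAltOuter PySem.Set.empty [] solutions

-- ===== PRECONDITION & SPEC =====
def Spec_extract_mistakes (solutions : List (List (String × String))) (out : List String) : Prop := out = extract_mistakes_alt solutions
instance (solutions : List (List (String × String))) (out : List String) : Decidable (Spec_extract_mistakes solutions out) := by unfold Spec_extract_mistakes; infer_instance

-- ===== CLAIM (what is proved, stated in full; the proofs are below) =====
def Claim_equal_extract_mistakes : Prop := ∀ (solutions : List (List (String × String))), Dom_extract_mistakes solutions → Spec_extract_mistakes solutions (extract_mistakes solutions)

-- ===== LEMMAS AND PROOFS =====

-- common spec: the uncapped strip/filter/dedup accumulation, per line list and per solution list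
def pvD (a : List String) (ls : List String) : List String :=
  ls.foldl (fun a l =>
    let t := PySem.Str.strip l
    if t ≠ "" ∧ t ∉ a then a ++ [t] else a) a

def pvLines (solution : List (String × String)) : List String :=
  let t := (PySem.Dict.mk solution).getD "common_mistakes" ""
  if t ≠ "" then (PySem.Str.split? t "\n").getD [] else []

def pvFull (a : List String) (sols : List (List (String × String))) : List String :=
  sols.foldl (fun a s => pvD a (pvLines s)) a

-- the per-solution stripped, filtered line list A appends
def pvFLines (s : List (String × String)) : List String :=
  ((pvLines s).map PySem.Str.strip).filter (fun m => m ≠ "")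

theorem pvD_eq_add_fold (ls : List String) : ∀ (a : List String),
    ((ls.map PySem.Str.strip).filter (fun m => m ≠ "")).foldl PySem.Set.add a = pvD a ls := by
  induction ls with
  | nil => intro a; simp [pvD]
  | cons l rest ih =>
    intro a
    by_cases ht : PySem.Str.strip l = ""
    · simp only [pvD, List.map_cons, List.filter_cons, ht, List.foldl_cons]
      simp only [ne_eq, not_true, decide_false, Bool.false_eq_true, if_false]
      rw [if_neg (by simp)]
      simpa [pvD] using ih a
    · simp only [pvD, List.map_cons, List.filter_cons, List.foldl_cons]
      rw [if_pos (by simp [ht])]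
      rw [List.foldl_cons]
      by_cases hm : PySem.Str.strip l ∈ a
      · have hadd : PySem.Set.add a (PySem.Str.strip l) = a := by
          simp [PySem.Set.add, hm]
        rw [hadd, if_neg (by simp [hm])]
        simpa [pvD] using ih a
      · have hadd : PySem.Set.add a (PySem.Str.strip l) = a ++ [PySem.Str.strip l] := by
          simp [PySem.Set.add, hm]
        rw [hadd, if_pos ⟨ht, hm⟩]
        simpa [pvD] using ih (a ++ [PySem.Str.strip l])

theorem pvCollect_eq (sols : List (List (String × String))) : ∀ (acc : List String),
    sols.foldl (fun all_mistakes solution =>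
      let mistakes_text := (PySem.Dict.mk solution).getD "common_mistakes" ""
      if mistakes_text ≠ "" then
        all_mistakes ++ (((PySem.Str.split? mistakes_text "\n").getD []).map PySem.Str.strip).filter (fun m => m ≠ "")
      else all_mistakes) acc = acc ++ sols.flatMap pvFLines := by
  induction sols with
  | nil => intro acc; simp
  | cons s rest ih =>
    intro acc
    rw [List.foldl_cons]
    dsimp only
    by_cases ht : (PySem.Dict.mk s).getD "common_mistakes" "" = ""
    · rw [if_neg (not_not_intro ht), ih]
      simp [pvFLines, pvLines, ht]
    · rw [if_pos ht, ih]
      simp [pvFLines, pvLines, ht, List.append_assoc]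

theorem pvFull_eq_dedup_fold (sols : List (List (String × String))) : ∀ (a : List String),
    (sols.flatMap pvFLines).foldl PySem.Set.add a = pvFull a sols := by
  induction sols with
  | nil => intro a; simp [pvFull]
  | cons s rest ih =>
    intro a
    simp only [List.flatMap_cons, List.foldl_append, pvFull, List.foldl_cons]
    rw [show pvFLines s = ((pvLines s).map PySem.Str.strip).filter (fun m => m ≠ "") from rfl,
      pvD_eq_add_fold]
    simpa [pvFull] using ih (pvD a (pvLines s))

theorem extract_mistakes_eq_take (sols : List (List (String × String))) :
    extract_mistakes sols = (pvFull [] sols).take 15 := by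
  unfold extract_mistakes
  rw [pvCollect_eq]
  simp only [List.nil_append]
  have hd : PySem.List.dedup (sols.flatMap pvFLines) = pvFull [] sols := by
    have := pvFull_eq_dedup_fold sols []
    simpa [PySem.List.dedup, PySem.Set.ofList, PySem.Set.empty] using this
  rw [hd, show (15 : Int) = ((15 : Nat) : Int) by norm_num, PySem.List.slice_to_natCast]

-- prefix facts
theorem pvD_prefix (ls : List String) : ∀ (a : List String), a <+: pvD a ls := by
  induction ls with
  | nil => intro a; simp [pvD]
  | cons l rest ih =>
    intro a
    rw [show pvD a (l :: rest)
        = pvD (if PySem.Str.strip l ≠ "" ∧ PySem.Str.strip l ∉ a then a ++ [PySem.Str.strip l] else a) rest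
      from rfl]
    by_cases h : PySem.Str.strip l ≠ "" ∧ PySem.Str.strip l ∉ a
    · rw [if_pos h]
      exact (List.prefix_append a [PySem.Str.strip l]).trans (ih _)
    · rw [if_neg h]
      exact ih a

theorem pvFull_prefix (sols : List (List (String × String))) : ∀ (a : List String), a <+: pvFull a sols := by
  induction sols with
  | nil => intro a; simp [pvFull]
  | cons s rest ih =>
    intro a
    rw [show pvFull a (s :: rest) = pvFull (pvD a (pvLines s)) rest from rfl]
    exact (pvD_prefix (pvLines s) a).trans (ih _)

-- inner loop of B vs the uncapped accumulation
theorem pvAltInner_spec (ls : List String) : ∀ (seen : PySem.Set String) (result : List String),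
    result.length < 15 → (∀ x, x ∈ seen ↔ x ∈ result) →
    ((pvAltInner seen result ls).2.2 = true →
        (pvAltInner seen result ls).2.1 = (pvD result ls).take 15 ∧ 15 ≤ (pvD result ls).length) ∧
    ((pvAltInner seen result ls).2.2 = false →
        (pvAltInner seen result ls).2.1 = pvD result ls ∧ (pvD result ls).length < 15 ∧
        (∀ x, x ∈ (pvAltInner seen result ls).1 ↔ x ∈ pvD result ls)) := by
  induction ls with
  | nil =>
    intro seen result hlen hseen
    constructor
    · intro h; simp [pvAltInner] at h
    · intro _; exact ⟨rfl, by simpa [pvD] using hlen, by simpa [pvAltInner, pvD] using hseen⟩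
  | cons raw rest ih =>
    intro seen result hlen hseen
    have hmem := hseen (PySem.Str.strip raw)
    have heq : pvAltInner seen result (raw :: rest)
        = if PySem.Str.strip raw ≠ "" ∧ PySem.Str.strip raw ∉ seen then
            (if (result ++ [PySem.Str.strip raw]).length = 15 then
              (seen.add (PySem.Str.strip raw), result ++ [PySem.Str.strip raw], true)
             else pvAltInner (seen.add (PySem.Str.strip raw)) (result ++ [PySem.Str.strip raw]) rest)
          else pvAltInner seen result rest := rfl
    have hD : pvD result (raw :: rest)
        = pvD (if PySem.Str.strip raw ≠ "" ∧ PySem.Str.strip raw ∉ result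
               then result ++ [PySem.Str.strip raw] else result) rest := rfl
    by_cases h : PySem.Str.strip raw ≠ "" ∧ PySem.Str.strip raw ∉ result
    · have h' : PySem.Str.strip raw ≠ "" ∧ PySem.Str.strip raw ∉ seen := by
        simp only [hmem]; exact h
      rw [heq, if_pos h', hD, if_pos h]
      by_cases h15 : (result ++ [PySem.Str.strip raw]).length = 15
      · rw [if_pos h15]
        constructor
        · intro _
          constructor
          · obtain ⟨ext, hext⟩ := pvD_prefix rest (result ++ [PySem.Str.strip raw])
            rw [← hext, ← h15, List.take_left]
          · have := (pvD_prefix rest (result ++ [PySem.Str.strip raw])).length_le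
            omega
        · intro hc; simp at hc
      · rw [if_neg h15]
        have hlen' : (result ++ [PySem.Str.strip raw]).length < 15 := by
          simp only [List.length_append, List.length_cons, List.length_nil] at h15 ⊢
          omega
        have hseen' : ∀ x, x ∈ seen.add (PySem.Str.strip raw) ↔ x ∈ result ++ [PySem.Str.strip raw] := by
          intro x
          rw [PySem.Set.mem_add]
          simp [hseen x]
        exact ih _ _ hlen' hseen'
    · have h' : ¬ (PySem.Str.strip raw ≠ "" ∧ PySem.Str.strip raw ∉ seen) := by
        simp only [hmem]; exact h
      rw [heq, if_neg h', hD, if_neg h]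
      exact ih _ _ hlen hseen

-- outer loop of B vs the capped spec
theorem pvAltOuter_spec (sols : List (List (String × String))) :
    ∀ (seen : PySem.Set String) (result : List String),
    result.length < 15 → (∀ x, x ∈ seen ↔ x ∈ result) →
    pvAltOuter seen result sols = (pvFull result sols).take 15 := by
  induction sols with
  | nil =>
    intro seen result hlen _
    simp [pvAltOuter, pvFull, List.take_of_length_le (Nat.le_of_lt hlen)]
  | cons s rest ih =>
    intro seen result hlen hseen
    have heq : pvAltOuter seen result (s :: rest)
        = if (PySem.Dict.mk s).getD "common_mistakes" "" ≠ "" then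
            match pvAltInner seen result ((PySem.Str.split? ((PySem.Dict.mk s).getD "common_mistakes" "") "\n").getD []) with
            | (seen', result', done) => if done then result' else pvAltOuter seen' result' rest
          else pvAltOuter seen result rest := rfl
    have hfull : pvFull result (s :: rest) = pvFull (pvD result (pvLines s)) rest := rfl
    by_cases ht : (PySem.Dict.mk s).getD "common_mistakes" "" = ""
    · rw [heq, if_neg (not_not_intro ht), hfull]
      rw [show pvLines s = [] by simp [pvLines, ht]]
      rw [show pvD result [] = result from rfl]
      exact ih seen result hlen hseen
    · have hlines : pvLines s
          = (PySem.Str.split? ((PySem.Dict.mk s).getD "common_mistakes" "") "\n").getD [] := by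
        simp [pvLines, ht]
      rw [heq, if_pos ht, hfull, hlines]
      obtain ⟨hT, hF⟩ := pvAltInner_spec
        ((PySem.Str.split? ((PySem.Dict.mk s).getD "common_mistakes" "") "\n").getD []) seen result hlen hseen
      rcases hmatch : pvAltInner seen result
          ((PySem.Str.split? ((PySem.Dict.mk s).getD "common_mistakes" "") "\n").getD [])
        with ⟨seen', result', done⟩
      rw [hmatch] at hT hF
      dsimp only
      cases done with
      | false =>
        obtain ⟨hres, hlt, hinv⟩ := hF rfl
        simp only at hres hlt hinv
        simp only [Bool.false_eq_true, if_false]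
        rw [hres]
        exact ih seen' _ hlt hinv
      | true =>
        obtain ⟨hres, hge⟩ := hT rfl
        simp only at hres hge
        simp only [if_true]
        rw [hres]
        obtain ⟨ext, hext⟩ :=
          pvFull_prefix rest (pvD result ((PySem.Str.split? ((PySem.Dict.mk s).getD "common_mistakes" "") "\n").getD []))
        rw [← hext, List.take_append_of_le_length hge]

-- ===== VERDICT (by name: the statement is the Claim_ definition above) =====
theorem extract_mistakes_spec : Claim_equal_extract_mistakes := by
  intro solutions _
  unfold Spec_extract_mistakes extract_mistakes_alt
  rw [extract_mistakes_eq_take]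
  rw [pvAltOuter_spec solutions PySem.Set.empty [] (by norm_num) (by simp [PySem.Set.empty])]
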